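-- pv_equiv track=rewrite | github.com/OxQuasar/nous-memories | iching/unification/fano_probe.py | mat_vec_f2
-- ===== SOURCE A (Python) =====
-- def mat_vec_f2(A, v):
--     result = 0
--     for i in range(3):
--         s = 0
--         for j in range(3):
--             s ^= A[i][j] & ((v >> j) & 1)
--         result |= (s << i)
--     return result
-- ===== SOURCE B (Python) =====
-- def mat_vec_f2(A, v):
--     # Column-major view: the product is the XOR (GF(2) sum) of the packed
--     # column masks of A selected by the set low bits of v.
--     columns = list(zip(A[0], A[1], A[2]))
--     result = 0
--     for j in range(3):
--         if (v >> j) & 1: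
--             a, b, c = columns[j]
--             result ^= (a & 1) | ((b & 1) << 1) | ((c & 1) << 2)
--     return result
-- ===== Notes on version B (the rewrite author's own statement) =====
-- stated objective: alternative
-- what changed: Replaces the row-by-row dot-product accumulation with the column-major linear-combination view: the three columns of A are packed once into 3-bit masks (via zip of the rows) and the result is the XOR of the column masks selected by the set low bits of v.
import Mathlib
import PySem

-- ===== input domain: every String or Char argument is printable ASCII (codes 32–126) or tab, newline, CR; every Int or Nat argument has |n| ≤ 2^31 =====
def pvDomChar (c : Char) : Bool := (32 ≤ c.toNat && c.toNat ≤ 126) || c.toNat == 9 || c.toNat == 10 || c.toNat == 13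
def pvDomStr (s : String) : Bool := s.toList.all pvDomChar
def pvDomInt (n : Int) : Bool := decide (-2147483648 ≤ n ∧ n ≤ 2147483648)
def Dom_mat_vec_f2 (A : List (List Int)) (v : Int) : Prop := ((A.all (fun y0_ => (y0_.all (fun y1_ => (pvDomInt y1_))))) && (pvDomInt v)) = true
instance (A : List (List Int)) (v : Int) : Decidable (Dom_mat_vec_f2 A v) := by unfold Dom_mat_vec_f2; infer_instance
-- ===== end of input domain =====

-- B replaces A's row-by-row dot-product accumulation with the column-major view:
-- pack each column of A into a 3-bit mask and XOR the masks selected by v's set low bits (alternative, same cost).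

-- ===== PORT A =====
def mat_vec_f2 (A : List (List Int)) (v : Int) : Int :=
  (PySem.List.pyRange 0 3 1).foldl (fun result i =>
    let s := (PySem.List.pyRange 0 3 1).foldl (fun s j =>
      PySem.Int.bxor s (PySem.Int.band ((PySem.List.pyGet? ((PySem.List.pyGet? A i).getD []) j).getD 0)
        (PySem.Int.band (v >>> j.toNat) 1))) 0
    PySem.Int.bor result (s <<< i.toNat)) 0

-- ===== PORT B =====
-- zip(A[0], A[1], A[2]) ported as a zip of nested pairs (Python tuple → nested products).
def mat_vec_f2_alt (A : List (List Int)) (v : Int) : Int :=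
  let columns := List.zip ((PySem.List.pyGet? A 0).getD [])
    (List.zip ((PySem.List.pyGet? A 1).getD [])  ((PySem.List.pyGet? A 2).getD []))
  (PySem.List.pyRange 0 3 1).foldl (fun result j =>
    if PySem.Int.band (v >>> j.toNat) 1 ≠ 0 then
      let t := (PySem.List.pyGet? columns j).getD (0, 0, 0)
      PySem.Int.bxor result
        (PySem.Int.bor (PySem.Int.bor (PySem.Int.band t.1 1) ((PySem.Int.band t.2.1 1) <<< (1:Nat)))
          ((PySem.Int.band t.2.2 1) <<< (2:Nat)))
    else result) 0

-- ===== PRECONDITION & SPEC =====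
-- Pre_ excludes exactly the inputs where A raises IndexError: fewer than 3 rows, or a short row among the first three.
def Pre_mat_vec_f2 (A : List (List Int)) (v : Int) : Prop :=
  3 ≤ A.length ∧ ∀ r ∈ A.take 3, 3 ≤ r.length
instance (A : List (List Int)) (v : Int) : Decidable (Pre_mat_vec_f2 A v) := by unfold Pre_mat_vec_f2; infer_instance
def pvWitness_mat_vec_f2 : List (List Int) × Int := ([[1,0,0],[0,1,0],[0,0,1]], 5)

def Spec_mat_vec_f2 (A : List (List Int)) (v : Int) (out : Int) : Prop := out = mat_vec_f2_alt A v
instance (A : List (List Int)) (v : Int) (out : Int) : Decidable (Spec_mat_vec_f2 A v out) := by unfold Spec_mat_vec_f2; infer_instance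

-- ===== CLAIM (what is proved, stated in full; the proofs are below) =====
def Claim_equal_mat_vec_f2 : Prop := ∀ (A : List (List Int)) (v : Int), Dom_mat_vec_f2 A v → Pre_mat_vec_f2 A v → Spec_mat_vec_f2 A v (mat_vec_f2 A v)

-- ===== LEMMAS AND PROOFS =====

-- The core identity on fully destructured rows: A's row-major accumulation equals B's
-- column-major mask XOR. Normalise every bit to a Boolean and let the kernel check all cases.
set_option maxHeartbeats 2000000 in
lemma core_eq (a0 b0 c0 a1 b1 c1 a2 b2 c2 v : Int) (t0 t1 t2 : List Int) (rest : List (List Int)) :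
    mat_vec_f2 ((a0::b0::c0::t0)::(a1::b1::c1::t1)::(a2::b2::c2::t2)::rest) v
      = mat_vec_f2_alt ((a0::b0::c0::t0)::(a1::b1::c1::t1)::(a2::b2::c2::t2)::rest) v := by
  have hr : PySem.List.pyRange 0 3 1 = [0, 1, 2] := by decide
  have m2 : ∀ a : Int, PySem.Int.mod a 2 = a % 2 :=
    fun a => PySem.Int.mod_eq_emod_of_pos (by norm_num)
  simp only [mat_vec_f2, mat_vec_f2_alt, hr, List.foldl, Int.reduceToNat]
  simp [pysem]
  have s0 : v >>> (0:Int) = v := by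
    rw [show ((0:Int)) = ((0:Nat):Int) by norm_num, Int.shiftRight_natCast_right]
    simp
  have s1 : v >>> (1:Int) = v >>> (1:Nat) := by
    rw [show ((1:Int)) = ((1:Nat):Int) by norm_num, Int.shiftRight_natCast_right]
  have s2 : v >>> (2:Int) = v >>> (2:Nat) := by
    rw [show ((2:Int)) = ((2:Nat):Int) by norm_num, Int.shiftRight_natCast_right]
  have cb1 : PySem.Int.band 1 (v >>> (1:Nat)) = (v >>> (1:Nat)) % 2 := by
    rw [PySem.Int.band_comm, PySem.Int.band_one, m2]
  have cb2 : PySem.Int.band 1 (v >>> (2:Nat)) = (v >>> (2:Nat)) % 2 := by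
    rw [PySem.Int.band_comm, PySem.Int.band_one, m2]
  simp only [s0, s1, s2, cb1, cb2]
  have hx : ∀ x : Int, ∃ b : Bool, x % 2 = cond b 1 0 := fun x => by
    rcases Int.emod_two_eq_zero_or_one x with h|h
    · exact ⟨false, h⟩
    · exact ⟨true, h⟩
  obtain ⟨u0, h0⟩ := hx v
  obtain ⟨u1, h1⟩ := hx (v >>> (1:Nat))
  obtain ⟨u2, h2⟩ := hx (v >>> (2:Nat))
  rw [h0, h1, h2]
  obtain ⟨x00, q00⟩ := hx a0
  obtain ⟨x01, q01⟩ := hx b0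
  obtain ⟨x02, q02⟩ := hx c0
  obtain ⟨x10, q10⟩ := hx a1
  obtain ⟨x11, q11⟩ := hx b1
  obtain ⟨x12, q12⟩ := hx c1
  obtain ⟨x20, q20⟩ := hx a2
  obtain ⟨x21, q21⟩ := hx b2
  obtain ⟨x22, q22⟩ := hx c2
  rcases u0 <;> rcases u1 <;> rcases u2 <;>
    simp only [Bool.cond_false, Bool.cond_true, PySem.Int.band_zero, PySem.Int.band_one, m2] <;>
    (try simp only [q00, q01, q02, q10, q11, q12, q20, q21, q22]) <;>
    clear q00 q01 q02 q10 q11 q12 q20 q21 q22 <;>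
    revert x00 x01 x02 x10 x11 x12 x20 x21 x22 <;> decide

-- ===== VERDICT (by name: the statement is the Claim_ definition above) =====
theorem mat_vec_f2_spec : Claim_equal_mat_vec_f2 := by
  intro A v _ hpre
  obtain ⟨hlen, hrows⟩ := hpre
  match A, hlen with
  | r0 :: r1 :: r2 :: rest, _ =>
    have h0 : 3 ≤ r0.length := hrows r0 (by simp)
    have h1 : 3 ≤ r1.length := hrows r1 (by simp)
    have h2 : 3 ≤ r2.length := hrows r2 (by simp)
    obtain ⟨a0, b0, c0, t0, rfl⟩ : ∃ a b c t, r0 = a :: b :: c :: t := by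
      match r0, h0 with | a :: b :: c :: t, _ => exact ⟨a, b, c, t, rfl⟩
    obtain ⟨a1, b1, c1, t1, rfl⟩ : ∃ a b c t, r1 = a :: b :: c :: t := by
      match r1, h1 with | a :: b :: c :: t, _ => exact ⟨a, b, c, t, rfl⟩
    obtain ⟨a2, b2, c2, t2, rfl⟩ : ∃ a b c t, r2 = a :: b :: c :: t := by
      match r2, h2 with | a :: b :: c :: t, _ => exact ⟨a, b, c, t, rfl⟩
    exact core_eq a0 b0 c0 a1 b1 c1 a2 b2 c2 v t0 t1 t2 rest
  | [], h => exact absurd h (by simp)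
  | [_], h => exact absurd h (by simp)
  | [_, _], h => exact absurd h (by simp)
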